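-- pv_equiv track=rewrite | github.com/Neal-Kotval/StormboundDeckOptimizer | main.py | calculate_total_wasted_mana
-- ===== SOURCE A (Python) =====
-- import itertools
--
-- def calculate_total_wasted_mana(deck, max_turn, starting_mana=3):
--     total_mana = 0
--
--     for i in range (starting_mana, max_turn + 1):
--         # Generate all possible unique hands (combinations of 4 cards from the deck)
--         possible_deck_indices = range(1, 13)
--         possible_index_hands = list(itertools.combinations(deck, 4))
--         possible_hands = list(itertools.combinations(deck, 4))
--
--         total_wasted_mana = 0
--
--         for hand in possible_hands:
--             # Generate all subsets of the hand
--             subsets = list(itertools.chain.from_iterable(itertools.combinations(hand, r) for r in range(1, len(hand) + 1)))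
--             # Find the subset that maximizes mana usage under the budget
--             max_mana_used = 0
--             for subset in subsets:
--                 mana_sum = sum(subset)
--
--                 if mana_sum <= i and mana_sum > max_mana_used:
--                     max_mana_used = mana_sum
--
--             # Calculate wasted mana for this hand
--             wasted_mana = i - max_mana_used
--             total_wasted_mana += wasted_mana
--
--         total_mana += total_wasted_mana
--
--     return total_mana
-- ===== SOURCE B (Python) =====
-- import itertools
--
-- def calculate_total_wasted_mana(deck, max_turn, starting_mana=3):
--     lo = starting_mana
--     hi = max_turn + 1          # turns are the half-open range [lo, hi)
--     if hi <= lo: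
--         return 0
--     # sum of all turn budgets i for i in [lo, hi)
--     turn_sum = (lo + hi - 1) * (hi - lo) // 2
--     total = 0
--     for a, b, c, d in itertools.combinations(deck, 4):
--         # the 15 non-empty subset sums of the hand, unrolled
--         ab = a + b; ac = a + c; ad = a + d
--         bc = b + c; bd = b + d; cd = c + d
--         sums = sorted(s for s in (a, b, c, d, ab, ac, ad, bc, bd, cd,
--                                   ab + c, ab + d, ac + d, bc + d, ab + cd)
--                       if s > 0)
--         # best(i) = largest threshold <= i (0 if none); summed over all turns
--         # i in [lo, hi) it telescopes between consecutive thresholds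
--         # (a duplicated threshold contributes 0)
--         used = 0
--         prev = 0
--         for s in sums:
--             cnt = hi - max(lo, s)
--             if cnt < 0:
--                 cnt = 0
--             used += (s - prev) * cnt
--             prev = s
--         total += turn_sum - used
--     return total
-- ===== Notes on version B (the rewrite author's own statement) =====
-- stated objective: alternative
-- what changed: Instead of re-enumerating all 4-card hands and their subsets once per turn, B enumerates the hands once, unrolls each hand's 15 subset sums, and sums the wasted mana over the whole turn range in closed form via an arithmetic series telescoped between the sorted positive subset-sum thresholds, removing the per-turn loop entirely.
import Mathlib
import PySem

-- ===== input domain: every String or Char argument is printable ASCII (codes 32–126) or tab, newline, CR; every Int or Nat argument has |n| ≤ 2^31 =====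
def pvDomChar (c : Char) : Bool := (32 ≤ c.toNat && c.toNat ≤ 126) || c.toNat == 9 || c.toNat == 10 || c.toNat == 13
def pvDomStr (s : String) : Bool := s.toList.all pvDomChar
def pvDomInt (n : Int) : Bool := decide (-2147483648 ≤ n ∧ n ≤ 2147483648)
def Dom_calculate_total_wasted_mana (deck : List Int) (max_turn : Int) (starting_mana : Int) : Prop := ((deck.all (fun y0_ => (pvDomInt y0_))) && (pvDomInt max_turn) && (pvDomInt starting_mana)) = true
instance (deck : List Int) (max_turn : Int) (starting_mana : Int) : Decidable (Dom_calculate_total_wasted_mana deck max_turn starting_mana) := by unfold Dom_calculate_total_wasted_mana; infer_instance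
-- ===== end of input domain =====

-- B replaces A's per-turn re-enumeration of all hands and subsets by a single pass over the
-- hands, integrating each hand's wasted mana over the whole turn range in closed form
-- (arithmetic series telescoped between its sorted positive subset-sum thresholds);
-- objective: alternative (the per-turn loop is removed entirely).

-- ===== PORT A =====
def calculate_total_wasted_mana (deck : List Int) (max_turn : Int) (starting_mana : Int) : Int :=
  (PySem.List.pyRange starting_mana (max_turn + 1) 1).foldl (fun total_mana i =>
    let _possible_deck_indices := PySem.List.pyRange 1 13 1
    let _possible_index_hands := PySem.List.combinations deck 4
    let possible_hands := PySem.List.combinations deck 4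
    let total_wasted_mana := possible_hands.foldl (fun total_wasted_mana hand =>
      let subsets := (PySem.List.pyRange 1 (PySem.List.len hand + 1) 1).flatMap
        (fun r => PySem.List.combinations hand r.toNat)
      let max_mana_used := subsets.foldl (fun max_mana_used subset =>
        let mana_sum := subset.sum
        if mana_sum ≤ i ∧ max_mana_used < mana_sum then mana_sum else max_mana_used) 0
      let wasted_mana := i - max_mana_used
      total_wasted_mana + wasted_mana) 0
    total_mana + total_wasted_mana) 0

-- ===== PORT B =====
-- the 15 non-empty subset sums of a 4-card hand (positive ones, ascending) — Source B's `sums`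
def altSums : List Int → List Int
  | [a, b, c, d] =>
    let ab := a + b
    let ac := a + c
    let ad := a + d
    let bc := b + c
    let bd := b + d
    let cd := c + d
    PySem.List.sorted
      (([a, b, c, d, ab, ac, ad, bc, bd, cd, ab + c, ab + d, ac + d, bc + d, ab + cd] : List Int).filter
        (fun s => decide (0 < s)))
      (fun x => x) false
  | _ => []  -- unreachable: every hand produced by combinations(deck, 4) unpacks into 4 cards

def calculate_total_wasted_mana_alt (deck : List Int) (max_turn : Int) (starting_mana : Int) : Int :=
  let lo := starting_mana
  let hi := max_turn + 1
  if hi ≤ lo then 0 else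
  let turn_sum := PySem.Int.floordiv ((lo + hi - 1) * (hi - lo)) 2
  (PySem.List.combinations deck 4).foldl (fun total hand =>
    let sums := altSums hand
    let up := sums.foldl (fun (q : Int × Int) s =>
      let cnt := hi - max lo s
      let cnt := if cnt < 0 then 0 else cnt
      (q.1 + (s - q.2) * cnt, s)) (0, 0)
    total + (turn_sum - up.1)) 0

-- ===== PRECONDITION & SPEC =====
def Spec_calculate_total_wasted_mana (deck : List Int) (max_turn : Int) (starting_mana : Int) (out : Int) : Prop := out = calculate_total_wasted_mana_alt deck max_turn starting_mana
instance (deck : List Int) (max_turn : Int) (starting_mana : Int) (out : Int) : Decidable (Spec_calculate_total_wasted_mana deck max_turn starting_mana out) := by unfold Spec_calculate_total_wasted_mana; infer_instance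

-- ===== CLAIM (what is proved, stated in full; the proofs are below) =====
def Claim_equal_calculate_total_wasted_mana : Prop := ∀ (deck : List Int) (max_turn : Int) (starting_mana : Int), Dom_calculate_total_wasted_mana deck max_turn starting_mana → Spec_calculate_total_wasted_mana deck max_turn starting_mana (calculate_total_wasted_mana deck max_turn starting_mana)

-- ===== LEMMAS AND PROOFS =====

-- A's running-max step, rewritten with `max`
def mstep (i m s : Int) : Int := if s ≤ i then max m s else m

lemma foldl_sum_step (i : Int) (L : List (List Int)) : ∀ a : Int,
    L.foldl (fun m subset => if subset.sum ≤ i ∧ m < subset.sum then subset.sum else m) a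
      = (L.map List.sum).foldl (mstep i) a := by
  induction L with
  | nil => intro a; rfl
  | cons c t ih =>
    intro a
    simp only [List.foldl_cons, List.map_cons, ih]
    congr 1
    simp only [mstep]
    split_ifs <;> omega

lemma mfold_le (i : Int) (L : List Int) : ∀ acc : Int,
    acc ≤ L.foldl (mstep i) acc ∧ ∀ x ∈ L, x ≤ i → x ≤ L.foldl (mstep i) acc := by
  induction L with
  | nil => intro acc; simp
  | cons s t ih =>
    intro acc
    refine ⟨?_, ?_⟩
    · refine le_trans ?_ (ih (mstep i acc s)).1
      simp only [mstep]; split_ifs <;> simp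
    · intro x hx hxi
      rcases List.mem_cons.mp hx with h | h
      · rw [h] at hxi ⊢
        refine le_trans ?_ (ih (mstep i acc s)).1
        simp only [mstep, if_pos hxi]; exact le_max_right _ _
      · exact (ih (mstep i acc s)).2 x h hxi

lemma mfold_mem (i : Int) (L : List Int) : ∀ acc : Int,
    L.foldl (mstep i) acc = acc ∨ (L.foldl (mstep i) acc ∈ L ∧ L.foldl (mstep i) acc ≤ i) := by
  induction L with
  | nil => intro acc; simp
  | cons s t ih =>
    intro acc
    simp only [List.foldl_cons]
    rcases ih (mstep i acc s) with h | h
    · rw [h]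
      by_cases h1 : s ≤ i
      · simp only [mstep, if_pos h1]
        rcases max_cases acc s with ⟨he, _⟩ | ⟨he, _⟩
        · left; exact he
        · right
          rw [he]
          exact ⟨by simp, h1⟩
      · simp [mstep, if_neg h1]
    · right; exact ⟨List.mem_cons_of_mem _ h.1, h.2⟩

lemma mfold_eq (i : Int) (L1 L2 : List Int)
    (h : ∀ x, 0 < x → x ≤ i → (x ∈ L1 ↔ x ∈ L2)) :
    L1.foldl (mstep i) 0 = L2.foldl (mstep i) 0 := by
  have key : ∀ (P Q : List Int), (∀ x, 0 < x → x ≤ i → x ∈ P → x ∈ Q) →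
      P.foldl (mstep i) 0 ≤ Q.foldl (mstep i) 0 := by
    intro P Q hPQ
    rcases mfold_mem i P 0 with he | ⟨hm, hle⟩
    · rw [he]; exact (mfold_le i Q 0).1
    · by_cases hp : 0 < P.foldl (mstep i) 0
      · exact (mfold_le i Q 0).2 _ (hPQ _ hp hle hm) hle
      · exact le_trans (by omega) (mfold_le i Q 0).1
  exact le_antisymm (key L1 L2 (fun x h1 h2 => (h x h1 h2).mp))
    (key L2 L1 (fun x h1 h2 => (h x h1 h2).mpr))

-- pointwise telescope of the running max over sorted thresholds
def tel (i p : Int) : List Int → Int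
  | [] => 0
  | s :: t => (s - p) * (if s ≤ i then 1 else 0) + tel i s t

-- telescope with each indicator summed over the turn range in closed form
def telCnt (lo hi p : Int) : List Int → Int
  | [] => 0
  | s :: t => (s - p) * (if hi - max lo s < 0 then 0 else hi - max lo s) + telCnt lo hi s t

lemma mfold_of_forall_gt (i : Int) (L : List Int) (h : ∀ x ∈ L, i < x) : ∀ p, L.foldl (mstep i) p = p := by
  induction L with
  | nil => intro p; simp
  | cons s t ih =>
    intro p
    have hs : i < s := h s (by simp)
    simp only [List.foldl_cons, mstep, if_neg (by omega : ¬ s ≤ i)]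
    exact ih (fun x hx => h x (List.mem_cons_of_mem _ hx)) p

lemma tel_of_forall_gt (i : Int) (L : List Int) (h : ∀ x ∈ L, i < x) : ∀ p, tel i p L = 0 := by
  induction L with
  | nil => intro p; simp [tel]
  | cons s t ih =>
    intro p
    have hs : i < s := h s (by simp)
    simp only [tel, if_neg (by omega : ¬ s ≤ i), mul_zero, zero_add]
    exact ih (fun x hx => h x (List.mem_cons_of_mem _ hx)) s

lemma mfold_tel (i : Int) (S : List Int) : ∀ p : Int, S.Pairwise (· ≤ ·) → (∀ s ∈ S, p ≤ s) →
    S.foldl (mstep i) p = p + tel i p S := by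
  induction S with
  | nil => intro p _ _; simp [tel]
  | cons s t ih =>
    intro p hpw hgt
    have hps : p ≤ s := hgt s (by simp)
    have hst : ∀ x ∈ t, s ≤ x := fun x hx => (List.pairwise_cons.mp hpw).1 x hx
    have hpw' : t.Pairwise (· ≤ ·) := (List.pairwise_cons.mp hpw).2
    by_cases hsi : s ≤ i
    · simp only [List.foldl_cons, tel, mstep, if_pos hsi, max_eq_right hps, mul_one]
      rw [ih s hpw' hst]; ring
    · have hti : ∀ x ∈ t, i < x := fun x hx => lt_of_lt_of_le (by omega) (hst x hx)
      simp only [List.foldl_cons, tel, mstep, if_neg hsi, mul_zero, zero_add]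
      rw [mfold_of_forall_gt i t hti p, tel_of_forall_gt i t hti s]; ring

-- number of turns i in [lo, hi) with s ≤ i, in closed form
lemma cnt_sum (lo hi s : Int) :
    ((PySem.List.pyRange lo hi 1).map (fun i => if s ≤ i then (1 : Int) else 0)).sum
      = (if hi - max lo s < 0 then 0 else hi - max lo s) := by
  by_cases h : hi ≤ lo
  · rw [PySem.List.pyRange_one_eq_nil h]; simp; omega
  · rw [PySem.List.pyRange_one_cons (by omega)]
    simp only [List.map_cons, List.sum_cons]
    rw [cnt_sum (lo + 1) hi s]
    split_ifs <;> omega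
termination_by (hi - lo).toNat
decreasing_by omega

-- arithmetic series: twice the sum of range(lo, hi)
lemma range_sum (lo hi : Int) (h : lo ≤ hi) :
    2 * (PySem.List.pyRange lo hi 1).sum = (lo + hi - 1) * (hi - lo) := by
  by_cases he : hi ≤ lo
  · have hEq : hi = lo := le_antisymm he h
    subst hEq
    rw [PySem.List.pyRange_one_eq_nil le_rfl]
    simp only [List.sum_nil, mul_zero]
    ring
  · rw [PySem.List.pyRange_one_cons (by omega)]
    simp only [List.sum_cons]
    have ih := range_sum (lo + 1) hi (by omega)
    linear_combination ih
termination_by (hi - lo).toNat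
decreasing_by omega

lemma sum_map_sub (R : List Int) (f g : Int → Int) :
    (R.map (fun i => f i - g i)).sum = (R.map f).sum - (R.map g).sum := by
  induction R with
  | nil => simp
  | cons a t ih => simp only [List.map_cons, List.sum_cons, ih]; ring

lemma sum_swap (R : List Int) (H : List (List Int)) (g : Int → List Int → Int) :
    (R.map (fun i => (H.map (fun h => g i h)).sum)).sum
      = (H.map (fun h => (R.map (fun i => g i h)).sum)).sum := by
  induction H with
  | nil => simp
  | cons h t ih =>
    simp only [List.map_cons, List.sum_cons]
    rw [← ih, ← PySem.List.sum_map_add_int]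

-- summing the pointwise telescope over the turn range gives the counted telescope
lemma sum_tel (lo hi : Int) (S : List Int) : ∀ p : Int,
    ((PySem.List.pyRange lo hi 1).map (fun i => tel i p S)).sum = telCnt lo hi p S := by
  induction S with
  | nil => intro p; simp [tel, telCnt]
  | cons s t ih =>
    intro p
    simp only [tel, telCnt]
    rw [PySem.List.sum_map_add_int, ih s, List.sum_map_mul_left, cnt_sum lo hi s]

-- B's pair fold computes the counted telescope
lemma pair_fold (lo hi : Int) (S : List Int) : ∀ u p : Int,
    (S.foldl (fun (q : Int × Int) s =>
        (q.1 + (s - q.2) * (if hi - max lo s < 0 then 0 else hi - max lo s), s)) (u, p)).1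
      = u + telCnt lo hi p S := by
  induction S with
  | nil => intro u p; simp [telCnt]
  | cons s t ih =>
    intro u p
    simp only [List.foldl_cons, telCnt, ih]
    try ring

lemma sums_eq (a b c d : Int) :
    ((PySem.List.pyRange 1 (PySem.List.len [a, b, c, d] + 1) 1).flatMap
        (fun r => PySem.List.combinations [a, b, c, d] r.toNat)).map List.sum
      = [a, b, c, d, a + b, a + c, a + d, b + c, b + d, c + d,
         a + b + c, a + b + d, a + c + d, b + c + d, a + b + (c + d)] := by
  have hl : PySem.List.len [a, b, c, d] + 1 = 5 := by norm_num [PySem.List.len_eq]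
  rw [hl]
  have h0 : PySem.List.pyRange 1 5 1 = [1, 2, 3, 4] := by decide
  rw [h0]
  have h : List.flatMap (fun r : Int => PySem.List.combinations [a, b, c, d] r.toNat) [1, 2, 3, 4]
      = [[a], [b], [c], [d], [a, b], [a, c], [a, d], [b, c], [b, d], [c, d],
         [a, b, c], [a, b, d], [a, c, d], [b, c, d], [a, b, c, d]] := by
    simp only [List.flatMap_cons, List.flatMap_nil, List.append_nil,
      PySem.List.combinations_cons_succ, PySem.List.combinations_zero,
      PySem.List.combinations_nil_succ, Int.toNat_one, List.map_cons, List.map_nil]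
    rfl
  rw [h]
  simp only [List.map_cons, List.map_nil, List.sum_cons, List.sum_nil, List.cons.injEq,
    and_true]
  omega

lemma mem_altSums (a b c d x : Int) :
    x ∈ altSums [a, b, c, d] ↔
      (x ∈ ([a, b, c, d, a + b, a + c, a + d, b + c, b + d, c + d,
             a + b + c, a + b + d, a + c + d, b + c + d, a + b + (c + d)] : List Int) ∧ 0 < x) := by
  simp only [altSums, PySem.List.mem_sorted, List.mem_filter, decide_eq_true_eq]

lemma altSums_pairwise (a b c d : Int) : (altSums [a, b, c, d]).Pairwise (· ≤ ·) := by
  simp only [altSums]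
  exact PySem.List.sorted_pairwise _ _

lemma altSums_pos (a b c d : Int) : ∀ s ∈ altSums [a, b, c, d], 0 ≤ s :=
  fun s hs => le_of_lt ((mem_altSums a b c d s).mp hs).2

-- contribution of one 4-card hand, summed over the turn range, in closed form
lemma hand_contrib (lo hi a b c d : Int) (hlt : lo < hi) :
    ((PySem.List.pyRange lo hi 1).map (fun i =>
        i - ((PySem.List.pyRange 1 (PySem.List.len [a, b, c, d] + 1) 1).flatMap
              (fun r => PySem.List.combinations [a, b, c, d] r.toNat)).foldl
            (fun m subset => if subset.sum ≤ i ∧ m < subset.sum then subset.sum else m) 0)).sum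
      = PySem.Int.floordiv ((lo + hi - 1) * (hi - lo)) 2
        - ((altSums [a, b, c, d]).foldl (fun (q : Int × Int) s =>
            (q.1 + (s - q.2) * (if hi - max lo s < 0 then 0 else hi - max lo s), s)) (0, 0)).1 := by
  have hbest : ∀ i : Int,
      ((PySem.List.pyRange 1 (PySem.List.len [a, b, c, d] + 1) 1).flatMap
          (fun r => PySem.List.combinations [a, b, c, d] r.toNat)).foldl
        (fun m subset => if subset.sum ≤ i ∧ m < subset.sum then subset.sum else m) 0
      = tel i 0 (altSums [a, b, c, d]) := by
    intro i
    rw [foldl_sum_step i, sums_eq a b c d]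
    rw [mfold_eq i _ (altSums [a, b, c, d]) (fun x hx hxi => by
      rw [mem_altSums]
      exact ⟨fun hm => ⟨hm, hx⟩, fun hm => hm.1⟩)]
    rw [mfold_tel i (altSums [a, b, c, d]) 0 (altSums_pairwise a b c d) (altSums_pos a b c d),
      zero_add]
  simp only [hbest]
  rw [sum_map_sub (PySem.List.pyRange lo hi 1) (fun i => i)
    (fun i => tel i 0 (altSums [a, b, c, d]))]
  rw [sum_tel lo hi (altSums [a, b, c, d]) 0, pair_fold lo hi (altSums [a, b, c, d]) 0 0, zero_add]
  have hrs : PySem.Int.floordiv ((lo + hi - 1) * (hi - lo)) 2 = (PySem.List.pyRange lo hi 1).sum := by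
    rw [PySem.Int.floordiv_eq_ediv_of_pos (by norm_num), ← range_sum lo hi (le_of_lt hlt),
      Int.mul_ediv_cancel_left _ (by norm_num)]
  rw [hrs, List.map_id']

-- ===== VERDICT (by name: the statement is the Claim_ definition above) =====
theorem calculate_total_wasted_mana_spec : Claim_equal_calculate_total_wasted_mana := by
  intro deck max_turn starting_mana _hdom
  unfold Spec_calculate_total_wasted_mana
  by_cases hle : max_turn + 1 ≤ starting_mana
  · simp only [calculate_total_wasted_mana, calculate_total_wasted_mana_alt,
      PySem.List.pyRange_one_eq_nil hle, List.foldl_nil, if_pos hle]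
  · simp only [calculate_total_wasted_mana, calculate_total_wasted_mana_alt, if_neg hle]
    simp only [PySem.List.foldl_add, zero_add]
    rw [sum_swap (PySem.List.pyRange starting_mana (max_turn + 1) 1)
        (PySem.List.combinations deck 4)]
    refine congrArg List.sum (List.map_congr_left ?_)
    intro hand hh
    have hlen : hand.length = 4 := PySem.List.length_of_mem_combinations hh
    rcases hand with _ | ⟨a, _ | ⟨b, _ | ⟨c, _ | ⟨d, _ | ⟨e, t⟩⟩⟩⟩⟩ <;>
      simp only [List.length_cons, List.length_nil] at hlen
    · omega
    · omega
    · omega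
    · omega
    · exact hand_contrib starting_mana (max_turn + 1) a b c d (by omega)
    · omega
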